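-- pv_equiv track=rewrite | github.com/Hafeezmhk7/Semantic-Scene-Completion | label_similarity_tsne.py | assign_point_colors
-- ===== SOURCE A (Python) =====
-- GROUP_COLORS = [
--     '#E63946',  # red
--     '#2196F3',  # blue
--     '#4CAF50',  # green
--     '#FF9800',  # orange
--     '#9C27B0',  # purple
--     '#00BCD4',  # cyan
--     '#FF5722',  # deep orange
--     '#8BC34A',  # light green
--     '#F06292',  # pink
--     '#795548',  # brown
-- ]
--
-- UNGROUPED_COLOR = '#CCCCCC'
--
-- def assign_point_colors(scene_ids: list, groups: list) -> tuple:
--     """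
--     Assign a colour and group label to every scene.
--     Ungrouped scenes get UNGROUPED_COLOR and label 'ungrouped'.
--     """
--     color_map = {}
--     label_map = {}
--
--     for g_idx, group in enumerate(groups):
--         color = GROUP_COLORS[g_idx % len(GROUP_COLORS)]
--         for sid in group:
--             color_map[sid] = color
--             label_map[sid] = f"group_{g_idx+1}"
--
--     for sid in scene_ids:
--         if sid not in color_map:
--             color_map[sid] = UNGROUPED_COLOR
--             label_map[sid] = 'ungrouped'
--
--     return color_map, label_map
-- ===== SOURCE B (Python) =====
-- GROUP_COLORS = [
--     '#E63946', '#2196F3', '#4CAF50', '#FF9800', '#9C27B0',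
--     '#00BCD4', '#FF5722', '#8BC34A', '#F06292', '#795548',
-- ]
--
-- UNGROUPED_COLOR = '#CCCCCC'
--
--
-- def assign_point_colors(scene_ids: list, groups: list) -> tuple:
--     """Build one scene->group-index map, then derive both output dicts from it."""
--     idx = {sid: g for g, group in enumerate(groups) for sid in group}
--     for sid in scene_ids:
--         idx.setdefault(sid, None)
--     color_map = {sid: (UNGROUPED_COLOR if g is None else GROUP_COLORS[g % len(GROUP_COLORS)])
--                  for sid, g in idx.items()}
--     label_map = {sid: ('ungrouped' if g is None else f"group_{g + 1}")
--                  for sid, g in idx.items()}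
--     return color_map, label_map
-- ===== Notes on version B (the rewrite author's own statement) =====
-- stated objective: alternative
-- what changed: Instead of maintaining two dicts in lockstep nested loops with a membership-guarded second pass, B builds a single scene->group-index map (comprehension plus setdefault) and derives both the color and label dicts from it by comprehensions.
import Mathlib
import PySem

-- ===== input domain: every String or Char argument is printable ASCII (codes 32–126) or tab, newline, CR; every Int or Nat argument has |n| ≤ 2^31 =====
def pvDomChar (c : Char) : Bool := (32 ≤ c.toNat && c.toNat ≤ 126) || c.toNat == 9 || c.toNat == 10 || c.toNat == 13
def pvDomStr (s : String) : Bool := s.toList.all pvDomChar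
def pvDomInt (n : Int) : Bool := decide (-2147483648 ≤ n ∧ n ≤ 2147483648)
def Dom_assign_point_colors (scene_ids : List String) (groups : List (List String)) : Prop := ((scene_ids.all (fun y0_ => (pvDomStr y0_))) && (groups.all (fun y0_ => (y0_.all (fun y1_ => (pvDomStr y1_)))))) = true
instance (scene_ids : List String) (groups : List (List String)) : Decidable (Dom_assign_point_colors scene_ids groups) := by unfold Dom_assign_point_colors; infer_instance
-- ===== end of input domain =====

-- B builds a single scene→group-index map first and derives both output dicts from it,
-- instead of A's lockstep maintenance of two dicts with a membership-guarded second pass (objective: alternative decomposition).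

def GROUP_COLORS : List String :=
  ["#E63946", "#2196F3", "#4CAF50", "#FF9800", "#9C27B0",
   "#00BCD4", "#FF5722", "#8BC34A", "#F06292", "#795548"]

def UNGROUPED_COLOR : String := "#CCCCCC"

-- ===== PORT A =====
def assign_point_colors (scene_ids : List String) (groups : List (List String)) : (List (String × String)) × (List (String × String)) :=
  let m := (PySem.List.enumerate groups 0).foldl
    (fun (m : PySem.Dict String String × PySem.Dict String String) p =>
      let color := PySem.List.pyGetD GROUP_COLORS (PySem.Int.mod p.1 (GROUP_COLORS.length : Int)) ""
      p.2.foldl (fun m sid =>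
        (m.1.insert sid color, m.2.insert sid ("group_" ++ PySem.Int.toStr (p.1 + 1)))) m)
    (PySem.Dict.empty, PySem.Dict.empty)
  let m := scene_ids.foldl (fun (m : PySem.Dict String String × PySem.Dict String String) sid =>
      if !(m.1.contains sid) then (m.1.insert sid UNGROUPED_COLOR, m.2.insert sid "ungrouped") else m) m
  (m.1.items, m.2.items)

-- ===== PORT B =====
-- B-side helpers: the two value functions of the derived dict comprehensions
def pvColorOf : Option Int → String
  | none => UNGROUPED_COLOR
  | some g => PySem.List.pyGetD GROUP_COLORS (PySem.Int.mod g (GROUP_COLORS.length : Int)) ""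

def pvLabelOf : Option Int → String
  | none => "ungrouped"
  | some g => "group_" ++ PySem.Int.toStr (g + 1)

def assign_point_colors_alt (scene_ids : List String) (groups : List (List String)) : (List (String × String)) × (List (String × String)) :=
  let idx0 : PySem.Dict String (Option Int) :=
    (PySem.List.enumerate groups 0).foldl
      (fun d p => p.2.foldl (fun d sid => d.insert sid (some p.1)) d) PySem.Dict.empty
  let idx := scene_ids.foldl (fun d sid => d.setdefault sid none) idx0
  let color_map := idx.items.foldl
    (fun (d : PySem.Dict String String) p => d.insert p.1 (pvColorOf p.2)) PySem.Dict.empty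
  let label_map := idx.items.foldl
    (fun (d : PySem.Dict String String) p => d.insert p.1 (pvLabelOf p.2)) PySem.Dict.empty
  (color_map.items, label_map.items)

-- ===== PRECONDITION & SPEC =====
def Spec_assign_point_colors (scene_ids : List String) (groups : List (List String)) (out : (List (String × String)) × (List (String × String))) : Prop := out = assign_point_colors_alt scene_ids groups
instance (scene_ids : List String) (groups : List (List String)) (out : (List (String × String)) × (List (String × String))) : Decidable (Spec_assign_point_colors scene_ids groups out) := by unfold Spec_assign_point_colors; infer_instance

-- ===== CLAIM (what is proved, stated in full; the proofs are below) =====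
def Claim_equal_assign_point_colors : Prop := ∀ (scene_ids : List String) (groups : List (List String)), Dom_assign_point_colors scene_ids groups → Spec_assign_point_colors scene_ids groups (assign_point_colors scene_ids groups)

-- ===== LEMMAS AND PROOFS =====

-- the item-map views of A's two dicts over B's index dict
def pvFc (q : String × Option Int) : String × String := (q.1, pvColorOf q.2)
def pvFl (q : String × Option Int) : String × String := (q.1, pvLabelOf q.2)

lemma pv_keys_of_items_map (f : Option Int → String)
    (d : PySem.Dict String (Option Int)) (c : PySem.Dict String String)
    (h : c.items = d.items.map (fun q => (q.1, f q.2))) : c.keys = d.keys := by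
  simp [PySem.Dict.keys, h, List.map_map, Function.comp_def]

lemma pv_insert_map (f : Option Int → String)
    (d : PySem.Dict String (Option Int)) (c : PySem.Dict String String)
    (h : c.items = d.items.map (fun q => (q.1, f q.2))) (k : String) (v : Option Int) :
    (c.insert k (f v)).items = (d.insert k v).items.map (fun q => (q.1, f q.2)) := by
  have hc : c.contains k = d.contains k := by
    rw [PySem.Dict.contains_eq_decide_mem_keys, PySem.Dict.contains_eq_decide_mem_keys,
      pv_keys_of_items_map f d c h]
  rw [PySem.Dict.items_insert, PySem.Dict.items_insert, hc, h]
  by_cases hd : d.contains k = true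
  · simp only [hd, if_true, List.map_map]
    refine List.map_congr_left (fun q _ => ?_)
    by_cases hq : q.1 = k <;> simp [hq]
  · simp [hd]

lemma pv_inner (v : Option Int) (vC vL : String)
    (hC : vC = pvColorOf v) (hL : vL = pvLabelOf v) (grp : List String) :
    ∀ (d : PySem.Dict String (Option Int)) (cm lm : PySem.Dict String String),
    cm.items = d.items.map pvFc → lm.items = d.items.map pvFl →
    (grp.foldl (fun (m : PySem.Dict String String × PySem.Dict String String) sid =>
        (m.1.insert sid vC, m.2.insert sid vL)) (cm, lm)).1.items
      = (grp.foldl (fun d sid => d.insert sid v) d).items.map pvFc ∧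
    (grp.foldl (fun (m : PySem.Dict String String × PySem.Dict String String) sid =>
        (m.1.insert sid vC, m.2.insert sid vL)) (cm, lm)).2.items
      = (grp.foldl (fun d sid => d.insert sid v) d).items.map pvFl := by
  induction grp with
  | nil => intro d cm lm h1 h2; exact ⟨h1, h2⟩
  | cons sid t ih =>
    intro d cm lm h1 h2
    simp only [List.foldl_cons]
    exact ih (d.insert sid v) (cm.insert sid vC) (lm.insert sid vL)
      (by rw [hC]; exact pv_insert_map pvColorOf d cm h1 sid v)
      (by rw [hL]; exact pv_insert_map pvLabelOf d lm h2 sid v)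

lemma pv_phase1 (l : List (Int × List String)) :
    ∀ (d : PySem.Dict String (Option Int)) (cm lm : PySem.Dict String String),
    cm.items = d.items.map pvFc → lm.items = d.items.map pvFl →
    (l.foldl (fun (m : PySem.Dict String String × PySem.Dict String String) p =>
        let color := PySem.List.pyGetD GROUP_COLORS (PySem.Int.mod p.1 (GROUP_COLORS.length : Int)) ""
        p.2.foldl (fun m sid =>
          (m.1.insert sid color, m.2.insert sid ("group_" ++ PySem.Int.toStr (p.1 + 1)))) m) (cm, lm)).1.items
      = (l.foldl (fun d p => p.2.foldl (fun d sid => d.insert sid (some p.1)) d) d).items.map pvFc ∧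
    (l.foldl (fun (m : PySem.Dict String String × PySem.Dict String String) p =>
        let color := PySem.List.pyGetD GROUP_COLORS (PySem.Int.mod p.1 (GROUP_COLORS.length : Int)) ""
        p.2.foldl (fun m sid =>
          (m.1.insert sid color, m.2.insert sid ("group_" ++ PySem.Int.toStr (p.1 + 1)))) m) (cm, lm)).2.items
      = (l.foldl (fun d p => p.2.foldl (fun d sid => d.insert sid (some p.1)) d) d).items.map pvFl := by
  induction l with
  | nil => intro d cm lm h1 h2; exact ⟨h1, h2⟩
  | cons p t ih =>
    intro d cm lm h1 h2
    simp only [List.foldl_cons]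
    obtain ⟨g1, g2⟩ := pv_inner (some p.1)
      (PySem.List.pyGetD GROUP_COLORS (PySem.Int.mod p.1 (GROUP_COLORS.length : Int)) "")
      ("group_" ++ PySem.Int.toStr (p.1 + 1)) rfl rfl p.2 d cm lm h1 h2
    exact ih _ _ _ g1 g2

lemma pv_phase2 (l : List String) :
    ∀ (d : PySem.Dict String (Option Int)) (cm lm : PySem.Dict String String),
    cm.items = d.items.map pvFc → lm.items = d.items.map pvFl →
    (l.foldl (fun (m : PySem.Dict String String × PySem.Dict String String) sid =>
        if !(m.1.contains sid) then (m.1.insert sid UNGROUPED_COLOR, m.2.insert sid "ungrouped") else m) (cm, lm)).1.items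
      = (l.foldl (fun d sid => d.setdefault sid none) d).items.map pvFc ∧
    (l.foldl (fun (m : PySem.Dict String String × PySem.Dict String String) sid =>
        if !(m.1.contains sid) then (m.1.insert sid UNGROUPED_COLOR, m.2.insert sid "ungrouped") else m) (cm, lm)).2.items
      = (l.foldl (fun d sid => d.setdefault sid none) d).items.map pvFl := by
  induction l with
  | nil => intro d cm lm h1 h2; exact ⟨h1, h2⟩
  | cons sid t ih =>
    intro d cm lm h1 h2
    have hc : cm.contains sid = d.contains sid := by
      rw [PySem.Dict.contains_eq_decide_mem_keys, PySem.Dict.contains_eq_decide_mem_keys,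
        pv_keys_of_items_map pvColorOf d cm h1]
    simp only [List.foldl_cons, hc]
    by_cases hd : d.contains sid = true
    · rw [PySem.Dict.setdefault_of_contains _ none hd]
      simpa [hd] using ih d cm lm h1 h2
    · have hd' : d.contains sid = false := by simpa using hd
      rw [PySem.Dict.setdefault_of_not_contains _ none hd']
      simpa [hd'] using ih (d.insert sid none) (cm.insert sid UNGROUPED_COLOR) (lm.insert sid "ungrouped")
        (pv_insert_map pvColorOf d cm h1 sid none)
        (pv_insert_map pvLabelOf d lm h2 sid none)

lemma pv_nodup_phase1 (l : List (Int × List String)) :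
    ∀ (d : PySem.Dict String (Option Int)), d.keys.Nodup →
    (l.foldl (fun d p => p.2.foldl (fun d sid => d.insert sid (some p.1)) d) d).keys.Nodup := by
  induction l with
  | nil => intro d h; exact h
  | cons p t ih =>
    intro d h
    simp only [List.foldl_cons]
    exact ih _ (PySem.Dict.nodup_keys_foldl_insert p.2 (fun _ _ => some p.1) d h)

lemma pv_nodup_phase2 (l : List String) :
    ∀ (d : PySem.Dict String (Option Int)), d.keys.Nodup →
    (l.foldl (fun d sid => d.setdefault sid none) d).keys.Nodup := by
  induction l with
  | nil => intro d h; exact h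
  | cons sid t ih =>
    intro d h
    simp only [List.foldl_cons]
    by_cases hd : d.contains sid = true
    · rw [PySem.Dict.setdefault_of_contains _ none hd]; exact ih d h
    · have hd' : d.contains sid = false := by simpa using hd
      rw [PySem.Dict.setdefault_of_not_contains _ none hd']
      exact ih _ (PySem.Dict.nodup_keys_insert _ _ _ h)

-- B's dict comprehension over the index dict is the item-wise map
lemma pv_comprehension (f : Option Int → String) (d : PySem.Dict String (Option Int))
    (hnd : d.keys.Nodup) :
    (d.items.foldl (fun (c : PySem.Dict String String) p => c.insert p.1 (f p.2)) PySem.Dict.empty).items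
      = d.items.map (fun q => (q.1, f q.2)) := by
  have := PySem.Dict.items_foldl_insert_fresh (l := d.items) (d := PySem.Dict.empty)
    (k := fun p => p.1) (v := fun p => f p.2)
    (by intro a _; simp) (by simpa [PySem.Dict.keys] using hnd)
  simpa using this

-- ===== VERDICT (by name: the statement is the Claim_ definition above) =====
theorem assign_point_colors_spec : Claim_equal_assign_point_colors := by
  intro scene_ids groups _
  unfold Spec_assign_point_colors
  show assign_point_colors scene_ids groups = assign_point_colors_alt scene_ids groups
  unfold assign_point_colors assign_point_colors_alt
  simp only []
  obtain ⟨h1, h2⟩ := pv_phase1 (PySem.List.enumerate groups 0) PySem.Dict.empty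
    PySem.Dict.empty PySem.Dict.empty (by rfl) (by rfl)
  obtain ⟨k1, k2⟩ := pv_phase2 scene_ids _ _ _ h1 h2
  have hnd := pv_nodup_phase2 scene_ids _
    (pv_nodup_phase1 (PySem.List.enumerate groups 0) PySem.Dict.empty (by decide))
  refine Prod.ext ?_ ?_
  · rw [pv_comprehension pvColorOf _ hnd]; exact k1
  · rw [pv_comprehension pvLabelOf _ hnd]; exact k2
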